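-- pv_equiv track=rewrite | github.com/mustafagoktugibolar/automated-music-segmentation | workers/segmenters/segmentation_service.py | _merge_consecutive_same_labels
-- ===== SOURCE A (Python) =====
-- def _merge_consecutive_same_labels(segments: list[dict]) -> list[dict]:
--     """
--     Merges consecutive segments that share the same label.
--     """
--     if not segments:
--         return segments
--
--     merged: list[dict] = []
--     for seg in segments:
--         if not merged:
--             merged.append(seg)
--             continue
--
--         last = merged[-1]
--         if last["label"] == seg["label"]:
--             last["end"] = seg["end"]
--         else:
--             merged.append(seg)
--
--     return merged
-- ===== SOURCE B (Python) =====
-- def _merge_consecutive_same_labels(segments: list[dict]) -> list[dict]: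
--     """
--     Merges consecutive segments that share the same label.
--
--     Scans the list run by run: each maximal block of consecutive segments
--     with the same label contributes its first dict, whose 'end' is set
--     (once, in place) to the last block member's 'end' when the block has
--     more than one element.
--     """
--     if not segments:
--         return segments
--
--     merged: list[dict] = []
--     i, n = 0, len(segments)
--     while i < n:
--         j = i + 1
--         while j < n and segments[j]["label"] == segments[i]["label"]:
--             j += 1
--         first = segments[i]
--         if j - i > 1:
--             first["end"] = segments[j - 1]["end"]
--         merged.append(first)
--         i = j
--     return merged
-- ===== Notes on version B (the rewrite author's own statement) =====
-- stated objective: alternative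
-- what changed: B scans the list run by run with a two-pointer inner loop that finds each maximal consecutive same-label block and writes the block's 'end' once from its last member, instead of A's fold that appends/re-merges element by element into the accumulator's last entry.
import Mathlib
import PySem

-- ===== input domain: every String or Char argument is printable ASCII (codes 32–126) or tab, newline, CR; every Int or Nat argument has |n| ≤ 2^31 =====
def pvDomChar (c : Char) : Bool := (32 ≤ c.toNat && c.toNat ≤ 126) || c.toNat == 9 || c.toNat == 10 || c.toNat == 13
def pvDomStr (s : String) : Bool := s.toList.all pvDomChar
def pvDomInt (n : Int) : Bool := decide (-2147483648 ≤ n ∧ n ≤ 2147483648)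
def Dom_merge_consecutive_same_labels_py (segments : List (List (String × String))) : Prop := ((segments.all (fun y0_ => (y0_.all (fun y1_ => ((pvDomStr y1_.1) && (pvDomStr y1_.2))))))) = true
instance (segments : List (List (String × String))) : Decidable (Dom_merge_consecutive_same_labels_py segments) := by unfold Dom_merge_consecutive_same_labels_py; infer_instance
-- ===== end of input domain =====

-- B merges each maximal consecutive same-label run in one step (run scan) instead of A's
-- element-by-element fold; both Pythons mutate the run-head dict's 'end' in place (same final
-- dict state) — the equivalence proved here is about the return value.

-- dict lookup d[k] as Option (none = KeyError), and in-place assignment d[k] = v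
def pvGetK (d : List (String × String)) (k : String) : Option String := (PySem.Dict.mk d).get? k
def pvSetK (d : List (String × String)) (k v : String) : List (String × String) := ((PySem.Dict.mk d).insert k v).items

-- ===== PORT A =====
def merge_consecutive_same_labels_py (segments : List (List (String × String))) : List (List (String × String)) :=
  if segments = [] then segments
  else
    segments.foldl (fun merged seg =>
      match merged.getLast? with
      | none => merged ++ [seg]
      | some last =>
        if pvGetK last "label" = pvGetK seg "label" then
          merged.dropLast ++ [pvSetK last "end" ((pvGetK seg "end").getD "")]
        else merged ++ [seg]) []

-- ===== PORT B =====
-- the outer while loop of Source B: one iteration consumes a whole maximal same-label run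
-- (the inner while loop is the takeWhile/dropWhile split at the run boundary)
def pvMergeRuns : List (List (String × String)) → List (List (String × String))
  | [] => []
  | first :: rest =>
    (match (rest.takeWhile (fun s => pvGetK s "label" == pvGetK first "label")).getLast? with
     | none => first                                         -- run of length 1: 'end' untouched
     | some t => pvSetK first "end" ((pvGetK t "end").getD ""))
    :: pvMergeRuns (rest.dropWhile (fun s => pvGetK s "label" == pvGetK first "label"))
  termination_by l => l.length
  decreasing_by simpa using Nat.lt_succ_of_le (rest.length_dropWhile_le _)

def merge_consecutive_same_labels_py_alt (segments : List (List (String × String))) : List (List (String × String)) :=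
  if segments = [] then segments else pvMergeRuns segments

-- ===== PRECONDITION & SPEC =====
-- Pre_ is exactly the set of inputs on which the Python A returns (no KeyError): for every
-- adjacent pair both segments carry a "label", and a segment that continues a run carries an "end".
def Pre_merge_consecutive_same_labels_py (segments : List (List (String × String))) : Prop :=
  List.IsChain (fun a b =>
    (pvGetK a "label").isSome = true ∧ (pvGetK b "label").isSome = true ∧
    (pvGetK a "label" = pvGetK b "label" → (pvGetK b "end").isSome = true)) segments
instance (segments : List (List (String × String))) : Decidable (Pre_merge_consecutive_same_labels_py segments) := by unfold Pre_merge_consecutive_same_labels_py; infer_instance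

def pvWitness_merge_consecutive_same_labels_py : (List (List (String × String))) :=
  [[("label", "a"), ("end", "0")], [("label", "a"), ("end", "1")], [("label", "b"), ("end", "2")]]

def Spec_merge_consecutive_same_labels_py (segments : List (List (String × String))) (out : List (List (String × String))) : Prop := out = merge_consecutive_same_labels_py_alt segments
instance (segments : List (List (String × String))) (out : List (List (String × String))) : Decidable (Spec_merge_consecutive_same_labels_py segments out) := by unfold Spec_merge_consecutive_same_labels_py; infer_instance

-- ===== CLAIM (what is proved, stated in full; the proofs are below) =====
def Claim_equal_merge_consecutive_same_labels_py : Prop := ∀ (segments : List (List (String × String))), Dom_merge_consecutive_same_labels_py segments → Pre_merge_consecutive_same_labels_py segments → Spec_merge_consecutive_same_labels_py segments (merge_consecutive_same_labels_py segments)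

-- ===== LEMMAS AND PROOFS =====

-- setting "end" does not change the "label" lookup
lemma pvGetK_pvSetK_label (d : List (String × String)) (v : String) :
    pvGetK (pvSetK d "end" v) "label" = pvGetK d "label" := by
  simpa [pvGetK, pvSetK] using PySem.Dict.get?_insert_of_ne (d := PySem.Dict.mk d) (v := v) (by decide)

-- a second in-place assignment to "end" overwrites the first
lemma pvSetK_pvSetK (d : List (String × String)) (v w : String) :
    pvSetK (pvSetK d "end" v) "end" w = pvSetK d "end" w :=
  congrArg PySem.Dict.items (PySem.Dict.insert_insert_self (PySem.Dict.mk d) "end" v w)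

-- absorbing one merged element into the run head
lemma pvMergeRuns_merge (first seg : List (String × String)) (rest : List (List (String × String)))
    (h : pvGetK first "label" = pvGetK seg "label") :
    pvMergeRuns (first :: seg :: rest)
      = pvMergeRuns (pvSetK first "end" ((pvGetK seg "end").getD "") :: rest) := by
  simp only [pvMergeRuns, pvGetK_pvSetK_label, List.takeWhile_cons, List.dropWhile_cons, ← h,
    beq_self_eq_true, if_true]
  cases hl : (rest.takeWhile (fun s => pvGetK s "label" == pvGetK first "label")).getLast? with
  | none =>
    rw [List.getLast?_eq_none_iff] at hl
    simp [hl]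
  | some t =>
    have hc : (seg :: rest.takeWhile (fun s => pvGetK s "label" == pvGetK first "label")).getLast?
        = some t := by rw [List.getLast?_cons, hl]; rfl
    simp [hc, pvSetK_pvSetK]

-- a label change starts a new run
lemma pvMergeRuns_skip (first seg : List (String × String)) (rest : List (List (String × String)))
    (h : ¬ pvGetK first "label" = pvGetK seg "label") :
    pvMergeRuns (first :: seg :: rest) = first :: pvMergeRuns (seg :: rest) := by
  have hb : (pvGetK seg "label" == pvGetK first "label") = false := by
    simp [beq_eq_false_iff_ne]; exact fun he => h he.symm
  conv_lhs => rw [pvMergeRuns]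
  simp [hb]

-- A's fold, run from a state whose last element is the current run head, produces B's runs
lemma foldl_eq_mergeRuns (rest : List (List (String × String))) :
    ∀ (acc : List (List (String × String))) (first : List (String × String)),
    List.foldl (fun merged seg =>
      match merged.getLast? with
      | none => merged ++ [seg]
      | some last =>
        if pvGetK last "label" = pvGetK seg "label" then
          merged.dropLast ++ [pvSetK last "end" ((pvGetK seg "end").getD "")]
        else merged ++ [seg]) (acc ++ [first]) rest
      = acc ++ pvMergeRuns (first :: rest) := by
  induction rest with
  | nil => intro acc first; simp [pvMergeRuns]
  | cons seg rest ih =>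
    intro acc first
    by_cases h : pvGetK first "label" = pvGetK seg "label"
    · rw [pvMergeRuns_merge first seg rest h]
      have := ih acc (pvSetK first "end" ((pvGetK seg "end").getD ""))
      simpa [List.getLast?_concat, List.dropLast_concat, h] using this
    · rw [pvMergeRuns_skip first seg rest h]
      have := ih (acc ++ [first]) seg
      simpa [List.getLast?_concat, List.dropLast_concat, h] using this

-- ===== VERDICT (by name: the statement is the Claim_ definition above) =====
theorem merge_consecutive_same_labels_py_spec : Claim_equal_merge_consecutive_same_labels_py := by
  intro segments _ _
  unfold Spec_merge_consecutive_same_labels_py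
  cases segments with
  | nil => rfl
  | cons s rest =>
    show merge_consecutive_same_labels_py (s :: rest) = merge_consecutive_same_labels_py_alt (s :: rest)
    unfold merge_consecutive_same_labels_py merge_consecutive_same_labels_py_alt
    simpa using foldl_eq_mergeRuns rest [] s
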